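-- pv_equiv track=rewrite | github.com/davbych/Tasks-by-Mikhail | 5. Strategy/#16.py | ds_multof_pfs
-- ===== SOURCE A (Python) =====
-- def ds_multof_pfs(nMin, nMax):
--     def prime_factors_sum(n):
--         total = 0
--         d = 2
--         while d * d <= n:
--             while n % d == 0:
--                 total += d
--                 n //= d
--             d += 1
--         if n > 1:
--             total += n
--         return total
--
--     def divisors_sum(n):
--         total = 0
--         d = 1
--         while d * d <= n:
--             if n % d == 0:
--                 total += d
--                 if d != n // d:
--                     total += n // d
--             d += 1
--         return total
--
--     result = []
--     for n in range(nMin, nMax + 1):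
--         pfs = prime_factors_sum(n)
--         if pfs == 0:
--             continue
--         ds = divisors_sum(n)
--         if ds % pfs == 0:
--             result.append(n)
--
--     return result
-- ===== SOURCE B (Python) =====
-- def ds_multof_pfs(nMin, nMax):
--     def sum_and_sigma(n):
--         # one trial-division factorization of n; returns (sum of prime factors
--         # with multiplicity, sum of divisors via the multiplicative product formula)
--         pfs, ds, m, d = 0, 1, n, 2
--         while d * d <= m:
--             if m % d == 0:
--                 pw = d
--                 while m % d == 0:
--                     m //= d
--                     pfs += d
--                     pw *= d
--                 ds *= (pw - 1) // (d - 1)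
--             d += 1
--         if m > 1:
--             pfs += m
--             ds *= m + 1
--         return pfs, ds
--
--     out = []
--     for n in range(max(nMin, 2), nMax + 1):
--         pfs, ds = sum_and_sigma(n)
--         if ds % pfs == 0:
--             out.append(n)
--     return out
-- ===== Notes on version B (the rewrite author's own statement) =====
-- stated objective: alternative
-- what changed: B factorizes each n once by trial division and computes the divisor sum from the multiplicative product formula sigma(n) = prod (p^(k+1)-1)/(p-1), instead of A's two separate passes (prime-factor trial division plus a full sqrt(n) divisor-enumeration loop).
import Mathlib
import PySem

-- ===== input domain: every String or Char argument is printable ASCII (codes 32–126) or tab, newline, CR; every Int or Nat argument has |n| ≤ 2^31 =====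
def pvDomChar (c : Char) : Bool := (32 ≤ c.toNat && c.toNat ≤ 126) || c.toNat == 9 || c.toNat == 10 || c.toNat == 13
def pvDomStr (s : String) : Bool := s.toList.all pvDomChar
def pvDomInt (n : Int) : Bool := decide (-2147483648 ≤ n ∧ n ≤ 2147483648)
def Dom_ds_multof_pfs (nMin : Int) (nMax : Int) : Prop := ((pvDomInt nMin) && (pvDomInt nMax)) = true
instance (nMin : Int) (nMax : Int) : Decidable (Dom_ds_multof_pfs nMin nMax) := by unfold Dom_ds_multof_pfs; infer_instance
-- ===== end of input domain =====

-- B factorizes each n once and derives the divisor sum from the multiplicative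
-- product formula, replacing A's separate divisor-enumeration loop (objective: alternative).

-- ===== PORT A =====

-- arithmetic facts cited by the loops' decreasing_by blocks
theorem pv_ediv_lt (n d : Int) (hn : 0 < n) (hd : 2 ≤ d) (hdvd : d ∣ n) : n / d < n :=
  (Int.div_lt_iff_of_dvd_of_pos (by omega) hdvd).mpr (by nlinarith)

theorem pvTrialDec (n d : Int) (h : PySem.Int.mod n d = 0 ∧ 2 ≤ d ∧ 0 < n) :
    (PySem.Int.floordiv n d).toNat < n.toNat := by
  rw [PySem.Int.floordiv_eq_ediv_of_pos (by omega)]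
  have h1 := pv_ediv_lt n d h.2.2 h.2.1 ((PySem.Int.mod_eq_zero_iff_dvd n d).mp h.1)
  have h2 := Int.ediv_nonneg (le_of_lt h.2.2) (by omega : (0:Int) ≤ d)
  omega

theorem pvLoopDec (n d n' : Int) (hc : d * d ≤ n) (hle : n' ≤ n) :
    (n' + 2 - (d + 1)).toNat < (n + 2 - d).toNat := by
  have h2 : 0 < n + 2 - d := by nlinarith [sq_nonneg d]
  omega


-- inner `while n % d == 0` of prime_factors_sum; the `2 ≤ d ∧ 0 < n` conjuncts
-- only make the loop total (they hold at every reachable call).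
def pfsTrial (total : Int) (n : Int) (d : Int) : Int × Int :=
  if h : PySem.Int.mod n d = 0 ∧ 2 ≤ d ∧ 0 < n then
    pfsTrial (total + d) (PySem.Int.floordiv n d) d
  else (total, n)
termination_by n.toNat
decreasing_by exact pvTrialDec n d h

-- termination helper for the outer loop (cited in its decreasing_by)
theorem pfsTrial_snd_le (total n d : Int) : (pfsTrial total n d).2 ≤ n := by
  fun_induction pfsTrial with
  | case1 t m hc ih =>
    have hle : PySem.Int.floordiv m d ≤ m := by
      rw [PySem.Int.floordiv_eq_ediv_of_pos (by omega)]
      have := pv_ediv_lt m d hc.2.2 hc.2.1 ((PySem.Int.mod_eq_zero_iff_dvd m d).mp hc.1)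
      omega
    omega
  | case2 => simp

-- outer `while d * d <= n` of prime_factors_sum, plus the final `if n > 1`
def pfsLoop (total n d : Int) : Int :=
  if h : d * d ≤ n then
    let r := pfsTrial total n d
    pfsLoop r.1 r.2 (d + 1)
  else if 1 < n then total + n else total
termination_by (n + 2 - d).toNat
decreasing_by exact pvLoopDec n d _ h (pfsTrial_snd_le total n d)

def pfsA (n : Int) : Int := pfsLoop 0 n 2

-- divisors_sum's `while d * d <= n` loop
def dsLoop (n total d : Int) : Int :=
  if h : d * d ≤ n then
    let total := if PySem.Int.mod n d = 0 then
        let total := total + d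
        if d ≠ PySem.Int.floordiv n d then total + PySem.Int.floordiv n d else total
      else total
    dsLoop n total (d + 1)
  else total
termination_by (n + 2 - d).toNat
decreasing_by exact pvLoopDec n d n h (le_refl n)

def dsA (n : Int) : Int := dsLoop n 0 1

def ds_multof_pfs (nMin : Int) (nMax : Int) : List Int :=
  (PySem.List.pyRange nMin (nMax + 1) 1).foldl
    (fun result n =>
      let pfs := pfsA n
      if pfs = 0 then result
      else
        let ds := dsA n
        if PySem.Int.mod ds pfs = 0 then result ++ [n] else result) []

-- ===== PORT B =====

-- inner `while m % d == 0` of sum_and_sigma; same totality conjuncts as pfsTrial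
def factorTrial (m pfs pw d : Int) : Int × Int × Int :=
  if h : PySem.Int.mod m d = 0 ∧ 2 ≤ d ∧ 0 < m then
    factorTrial (PySem.Int.floordiv m d) (pfs + d) (pw * d) d
  else (m, pfs, pw)
termination_by m.toNat
decreasing_by exact pvTrialDec m d h

-- termination helper for factorLoop (cited in its decreasing_by)
theorem factorTrial_fst_le (m pfs pw d : Int) : (factorTrial m pfs pw d).1 ≤ m := by
  fun_induction factorTrial with
  | case1 a b c hc ih =>
    have hle : PySem.Int.floordiv a d ≤ a := by
      rw [PySem.Int.floordiv_eq_ediv_of_pos (by omega)]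
      have := pv_ediv_lt a d hc.2.2 hc.2.1 ((PySem.Int.mod_eq_zero_iff_dvd a d).mp hc.1)
      omega
    omega
  | case2 => simp

-- outer loop of sum_and_sigma, returning (pfs, ds)
def factorLoop (m pfs ds d : Int) : Int × Int :=
  if h : d * d ≤ m then
    if PySem.Int.mod m d = 0 then
      let r := factorTrial m pfs d d
      factorLoop r.1 r.2.1 (ds * PySem.Int.floordiv (r.2.2 - 1) (d - 1)) (d + 1)
    else
      factorLoop m pfs ds (d + 1)
  else if 1 < m then (pfs + m, ds * (m + 1)) else (pfs, ds)
termination_by (m + 2 - d).toNat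
decreasing_by
  · exact pvLoopDec m d _ h (factorTrial_fst_le m pfs d d)
  · exact pvLoopDec m d m h (le_refl m)

def ds_multof_pfs_alt (nMin : Int) (nMax : Int) : List Int :=
  (PySem.List.pyRange (max nMin 2) (nMax + 1) 1).foldl
    (fun out n =>
      let r := factorLoop n 0 1 2
      if PySem.Int.mod r.2 r.1 = 0 then out ++ [n] else out) []

-- ===== PRECONDITION & SPEC =====
def Spec_ds_multof_pfs (nMin : Int) (nMax : Int) (out : List Int) : Prop := out = ds_multof_pfs_alt nMin nMax
instance (nMin : Int) (nMax : Int) (out : List Int) : Decidable (Spec_ds_multof_pfs nMin nMax out) := by unfold Spec_ds_multof_pfs; infer_instance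

-- ===== CLAIM (what is proved, stated in full; the proofs are below) =====
def Claim_equal_ds_multof_pfs : Prop := ∀ (nMin : Int) (nMax : Int), Dom_ds_multof_pfs nMin nMax → Spec_ds_multof_pfs nMin nMax (ds_multof_pfs nMin nMax)

-- ===== LEMMAS AND PROOFS =====

theorem trial_parallel (t m p pw d : Int) :
    (pfsTrial t m d).1 = t + ((factorTrial m p pw d).2.1 - p) ∧
    (pfsTrial t m d).2 = (factorTrial m p pw d).1 := by
  fun_induction pfsTrial t m d generalizing p pw with
  | case1 t m hc ih =>
    rw [factorTrial, dif_pos hc]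
    obtain ⟨ih1, ih2⟩ := ih (p + d) (pw * d)
    exact ⟨by rw [ih1]; ring, ih2⟩
  | case2 t m hc =>
    rw [factorTrial, dif_neg hc]
    exact ⟨by ring, rfl⟩

theorem pfs_parallel (n d total pfs ds : Int) :
    pfsLoop total n d = total + ((factorLoop n pfs ds d).1 - pfs) := by
  fun_induction pfsLoop total n d generalizing pfs ds with
  | case1 t n d hc r ih =>
    rw [factorLoop, dif_pos hc]
    by_cases hm : PySem.Int.mod n d = 0
    · rw [if_pos hm]
      obtain ⟨tp1, tp2⟩ := trial_parallel t n pfs d d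
      have h1 : r.1 = t + ((factorTrial n pfs d d).2.1 - pfs) := tp1
      have h2 : r.2 = (factorTrial n pfs d d).1 := tp2
      rw [ih ((factorTrial n pfs d d).2.1)
            (ds * PySem.Int.floordiv ((factorTrial n pfs d d).2.2 - 1) (d - 1)), h1, h2]
      ring
    · rw [if_neg hm]
      have hr : r = (t, n) := by
        show pfsTrial t n d = (t, n)
        rw [pfsTrial, dif_neg (by simp [hm])]
      rw [ih pfs ds, hr]
  | case2 t n d hc h1 =>
    rw [factorLoop, dif_neg hc, if_pos h1]
    ring
  | case3 t n d hc h1 =>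
    rw [factorLoop, dif_neg hc, if_neg h1]
    ring

theorem pfsTrial_fst_ge (t m d : Int) : t ≤ (pfsTrial t m d).1 := by
  fun_induction pfsTrial t m d with
  | case1 t m hc ih => omega
  | case2 t m hc => simp

theorem pfsLoop_pos : ∀ (total n d : Int), 2 ≤ d → 2 ≤ n → total + 2 ≤ pfsLoop total n d := by
  intro total n d
  fun_induction pfsLoop total n d with
  | case1 t n d hc r ih =>
    intro hd hn
    have hge : t ≤ r.1 := pfsTrial_fst_ge t n d
    by_cases h2 : 2 ≤ r.2
    · have := ih (by omega) h2
      omega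
    · by_cases hm : PySem.Int.mod n d = 0
      · have hstep : t + d ≤ r.1 := by
          show t + d ≤ (pfsTrial t n d).1
          rw [pfsTrial, dif_pos ⟨hm, hd, by nlinarith⟩]
          exact pfsTrial_fst_ge _ _ _
        have hend : pfsLoop r.1 r.2 (d + 1) = r.1 := by
          rw [pfsLoop, dif_neg (by nlinarith), if_neg (by omega)]
        rw [hend]; omega
      · exfalso
        have hr : r = (t, n) := by
          show pfsTrial t n d = (t, n)
          rw [pfsTrial, dif_neg (by simp [hm])]
        rw [hr] at h2; simp at h2; omega
  | case2 t n d hc h1 => intro _ _; omega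
  | case3 t n d hc h1 => intro _ hn; omega

theorem factorTrial_spec : ∀ (m p pw d : Int), 2 ≤ d → 0 < m →
    ∃ k : ℕ, (factorTrial m p pw d).1 * d ^ k = m ∧
      (factorTrial m p pw d).2.2 = pw * d ^ k ∧
      ¬ d ∣ (factorTrial m p pw d).1 ∧
      0 < (factorTrial m p pw d).1 ∧
      (d ∣ m → 1 ≤ k) := by
  intro m p pw d
  fun_induction factorTrial m p pw d with
  | case1 m p pw hc ih =>
    intro hd hm
    have hdvd := (PySem.Int.mod_eq_zero_iff_dvd m d).mp hc.1
    have hfl : PySem.Int.floordiv m d = m / d := PySem.Int.floordiv_eq_ediv_of_pos (by omega)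
    have hpos : 0 < PySem.Int.floordiv m d := by
      rw [hfl]; rcases hdvd with ⟨c, rfl⟩
      rw [Int.mul_ediv_cancel_left _ (by omega : d ≠ 0)]; nlinarith
    obtain ⟨k, h1, h2, h3, h4, h5⟩ := ih hd hpos
    refine ⟨k + 1, ?_, ?_, h3, h4, fun _ => by omega⟩
    · rw [pow_succ, ← mul_assoc, h1, hfl, Int.ediv_mul_cancel hdvd]
    · rw [h2, pow_succ]; ring
  | case2 m p pw hc =>
    intro hd hm
    have hnd : ¬ d ∣ m := fun hdd =>
      hc ⟨(PySem.Int.mod_eq_zero_iff_dvd m d).mpr hdd, hd, hm⟩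
    exact ⟨0, by simp, by simp, hnd, hm, fun hdd => absurd hdd hnd⟩

def dsum (n : Int) : Int := ∑ j ∈ n.toNat.divisors, (j : Int)

theorem dsum_one : dsum 1 = 1 := by decide

theorem dsum_natCast (x : ℕ) : dsum (x : Int) = ∑ j ∈ x.divisors, (j : Int) := by
  simp [dsum]

theorem dsum_prime {p : ℕ} (hp : p.Prime) : dsum (p : Int) = (p : Int) + 1 := by
  rw [dsum_natCast, hp.divisors]
  rw [Finset.sum_pair hp.one_lt.ne]
  push_cast; ring

theorem dsum_prime_pow {p : ℕ} (hp : p.Prime) (k : ℕ) :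
    dsum ((p : Int) ^ k) = ∑ j ∈ Finset.range (k + 1), (p : Int) ^ j := by
  have h1 : ((p : Int) ^ k) = ((p ^ k : ℕ) : Int) := by push_cast; ring
  rw [h1, dsum_natCast]
  have h2 : (p ^ k).divisors.sum (fun j => (j : Int)) =
      ((ArithmeticFunction.sigma 1 (p ^ k) : ℕ) : Int) := by
    rw [ArithmeticFunction.sigma_one_apply]; push_cast; rfl
  rw [h2, ArithmeticFunction.sigma_one_apply_prime_pow hp]
  push_cast; rfl

theorem dsum_mul_coprime {a b : ℕ} (hab : a.Coprime b) :
    dsum ((a * b : ℕ) : Int) = dsum (a : Int) * dsum (b : Int) := by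
  rw [dsum_natCast, dsum_natCast, dsum_natCast, ← Nat.cast_sum, ← Nat.cast_sum, ← Nat.cast_sum,
    Nat.Coprime.sum_divisors_mul hab]
  push_cast; ring

theorem floordiv_geom (d : Int) (hd : 2 ≤ d) (k : ℕ) :
    PySem.Int.floordiv (d ^ (k + 1) - 1) (d - 1) = ∑ j ∈ Finset.range (k + 1), d ^ j := by
  have hg := geom_sum_mul d (k + 1)
  rw [← hg, PySem.Int.floordiv_eq_ediv_of_pos (by omega), Int.mul_ediv_cancel _ (by omega)]

-- invariant ⇒ primality of the found factor
theorem prime_of_inv (m d : Int) (hd : 2 ≤ d) (hm : 0 < m) (hdvd : d ∣ m)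
    (hinv : ∀ e : Int, 2 ≤ e → e < d → ¬ e ∣ m) : d.toNat.Prime := by
  rw [Nat.prime_def_lt]
  refine ⟨by omega, fun e he hedvd => ?_⟩
  by_contra hne
  have he0 : e ≠ 0 := by rintro rfl; simp at hedvd; omega
  have he2 : 2 ≤ e := by omega
  have hD : ((d.toNat : ℕ) : Int) = d := Int.toNat_of_nonneg (by omega)
  have h1 : ((e : ℕ) : Int) ∣ ((d.toNat : ℕ) : Int) := Int.natCast_dvd_natCast.mpr hedvd
  have h2 : ((e : ℕ) : Int) ∣ m := dvd_trans (hD ▸ h1) hdvd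
  exact hinv ((e : ℕ) : Int) (by exact_mod_cast he2) (by omega) h2

-- invariant + loop exit ⇒ the residual is prime
theorem prime_tail_of_inv (m d : Int) (hd : 2 ≤ d) (hm : 2 ≤ m) (hlt : ¬ d * d ≤ m)
    (hinv : ∀ e : Int, 2 ≤ e → e < d → ¬ e ∣ m) : m.toNat.Prime := by
  rw [Nat.prime_def_le_sqrt]
  refine ⟨by omega, fun e he hesq hedvd => ?_⟩
  have hee : e * e ≤ m.toNat := Nat.le_sqrt.mp hesq
  have hM : ((m.toNat : ℕ) : Int) = m := Int.toNat_of_nonneg (by omega)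
  have hee' : ((e : ℕ) : Int) * ((e : ℕ) : Int) ≤ m := by
    rw [← hM]; exact_mod_cast hee
  have helt : ((e : ℕ) : Int) < d := by nlinarith [(by exact_mod_cast he : (2:ℤ) ≤ (e : ℕ))]
  have h2 : ((e : ℕ) : Int) ∣ m := by
    rw [← hM]; exact_mod_cast hedvd
  exact hinv ((e : ℕ) : Int) (by exact_mod_cast he) helt h2

theorem factorLoop_snd : ∀ (m pfs ds d : Int), 2 ≤ d → 1 ≤ m →
    (∀ e : Int, 2 ≤ e → e < d → ¬ e ∣ m) →
    (factorLoop m pfs ds d).2 = ds * dsum m := by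
  intro m pfs ds d
  fun_induction factorLoop m pfs ds d with
  | case1 m pfs ds d hc hm0 r ih =>
    intro hd hm hinv
    have hdvd : d ∣ m := (PySem.Int.mod_eq_zero_iff_dvd m d).mp hm0
    obtain ⟨k, hk1, hk2, hk3, hk4, hk5⟩ := factorTrial_spec m pfs d d hd (by omega)
    have hr1 : r.1 * d ^ k = m := hk1
    have hr2 : r.2.2 = d * d ^ k := hk2
    have hr3 : ¬ d ∣ r.1 := hk3
    have hr4 : 0 < r.1 := hk4
    have hp : d.toNat.Prime := prime_of_inv m d hd (by omega) hdvd hinv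
    have hD : ((d.toNat : ℕ) : Int) = d := Int.toNat_of_nonneg (by omega)
    have hinv' : ∀ e : Int, 2 ≤ e → e < d + 1 → ¬ e ∣ r.1 := by
      intro e he helt hedvd
      rcases lt_or_eq_of_le (by omega : e ≤ d) with h | h
      · exact hinv e he h (hedvd.trans ⟨d ^ k, hr1.symm⟩)
      · exact hr3 (h ▸ hedvd)
    have ihv := ih (by omega) (by omega) hinv'
    rw [ihv]
    have hM1 : ((r.1.toNat : ℕ) : Int) = r.1 := Int.toNat_of_nonneg (by omega)
    have hndvd : ¬ d.toNat ∣ r.1.toNat := by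
      intro hdd
      exact hr3 (by rw [← hD, ← hM1] at *; exact_mod_cast hdd)
    have hcop : (d.toNat ^ k).Coprime r.1.toNat :=
      Nat.Coprime.pow_left k ((Nat.Prime.coprime_iff_not_dvd hp).mpr hndvd)
    have hmeq : m = ((d.toNat ^ k * r.1.toNat : ℕ) : Int) := by
      push_cast [hD, hM1]
      rw [← hr1]; ring
    have hsplit : dsum m = dsum ((d.toNat ^ k : ℕ) : ℤ) * dsum r.1 := by
      rw [hmeq, dsum_mul_coprime hcop, hM1]
    have hcast : ((d.toNat ^ k : ℕ) : ℤ) = d ^ k := by push_cast [hD]; ring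
    have hds : dsum ((d.toNat ^ k : ℕ) : ℤ) = ∑ j ∈ Finset.range (k + 1), d ^ j := by
      have h3 := dsum_prime_pow hp k
      rw [hD] at h3
      rw [hcast, h3]
    have hgeo : PySem.Int.floordiv (r.2.2 - 1) (d - 1) = ∑ j ∈ Finset.range (k + 1), d ^ j := by
      rw [hr2, ← pow_succ' d k, floordiv_geom d hd k]
    rw [hgeo, hsplit, hds]
    ring
  | case2 m pfs ds d hc hm0 ih =>
    intro hd hm hinv
    apply ih (by omega) hm
    intro e he helt hedvd
    rcases lt_or_eq_of_le (by omega : e ≤ d) with h | h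
    · exact hinv e he h hedvd
    · exact hm0 ((PySem.Int.mod_eq_zero_iff_dvd m d).mpr (h ▸ hedvd))
  | case3 m pfs ds d hc h1 =>
    intro hd hm hinv
    have hp := prime_tail_of_inv m d hd (by omega) hc hinv
    have hM : ((m.toNat : ℕ) : Int) = m := Int.toNat_of_nonneg (by omega)
    have hthis := dsum_prime hp
    rw [hM] at hthis
    show ds * (m + 1) = ds * dsum m
    rw [hthis]
  | case4 m pfs ds d hc h1 =>
    intro hd hm hinv
    have hm1 : m = 1 := by omega
    subst hm1
    show ds = ds * dsum 1
    rw [dsum_one]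
    ring

theorem dsLoop_spec : ∀ (n total d : Int), 1 ≤ d → 1 ≤ n →
    dsLoop n total d = total + ↑(∑ j ∈ (Finset.Icc d.toNat n.toNat.sqrt).filter (· ∣ n.toNat),
      (j + if j ≠ n.toNat / j then n.toNat / j else 0)) := by
  intro n total d
  fun_induction dsLoop n total d with
  | case1 t d hc tot ih =>
    intro hd hn
    have hD : ((d.toNat : ℕ) : Int) = d := Int.toNat_of_nonneg (by omega)
    have hN : ((n.toNat : ℕ) : Int) = n := Int.toNat_of_nonneg (by omega)
    have hsq : d.toNat ≤ n.toNat.sqrt := by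
      rw [Nat.le_sqrt]
      have h0 : ((d.toNat * d.toNat : ℕ) : ℤ) ≤ ((n.toNat : ℕ) : ℤ) := by
        push_cast [hD, hN]; exact hc
      exact_mod_cast h0
    have hins : Finset.Icc d.toNat n.toNat.sqrt
        = insert d.toNat (Finset.Icc (d.toNat + 1) n.toNat.sqrt) :=
      (Finset.insert_Icc_add_one_left_eq_Icc hsq).symm
    have hnotmem : d.toNat ∉ Finset.Icc (d.toNat + 1) n.toNat.sqrt := by simp
    have hdvd_iff : PySem.Int.mod n d = 0 ↔ d.toNat ∣ n.toNat := by
      rw [PySem.Int.mod_eq_zero_iff_dvd]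
      rw [show (d ∣ n ↔ ((d.toNat : ℕ) : ℤ) ∣ ((n.toNat : ℕ) : ℤ)) from by rw [hD, hN]]
      exact Int.natCast_dvd_natCast
    have hfdiv : PySem.Int.floordiv n d = ((n.toNat / d.toNat : ℕ) : ℤ) := by
      rw [PySem.Int.floordiv_eq_ediv_of_pos (by omega)]
      rw [show n / d = ((n.toNat : ℕ) : ℤ) / ((d.toNat : ℕ) : ℤ) from by rw [hD, hN]]
      exact (Int.natCast_div n.toNat d.toNat).symm
    have hcond : (d ≠ PySem.Int.floordiv n d) ↔ (d.toNat ≠ n.toNat / d.toNat) := by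
      rw [hfdiv, ← hD]
      exact not_congr Int.natCast_inj
    have htoNat1 : (d + 1).toNat = d.toNat + 1 := by omega
    rw [ih (by omega) hn]
    have htot : tot = if PySem.Int.mod n d = 0 then
        (if d ≠ PySem.Int.floordiv n d then t + d + PySem.Int.floordiv n d else t + d)
      else t := rfl
    have hsum : ∑ j ∈ (Finset.Icc d.toNat n.toNat.sqrt).filter (· ∣ n.toNat),
          (j + if j ≠ n.toNat / j then n.toNat / j else 0)
        = (if d.toNat ∣ n.toNat then
            (d.toNat + if d.toNat ≠ n.toNat / d.toNat then n.toNat / d.toNat else 0) else 0)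
          + ∑ j ∈ (Finset.Icc (d.toNat + 1) n.toNat.sqrt).filter (· ∣ n.toNat),
              (j + if j ≠ n.toNat / j then n.toNat / j else 0) := by
      rw [hins, Finset.filter_insert]
      by_cases h : d.toNat ∣ n.toNat
      · rw [if_pos h, if_pos h,
          Finset.sum_insert (fun hmem => hnotmem (Finset.mem_filter.mp hmem).1)]
      · rw [if_neg h, if_neg h, zero_add]
    rw [htot, hsum, htoNat1]
    by_cases hm : PySem.Int.mod n d = 0
    · rw [if_pos hm, if_pos (hdvd_iff.mp hm)]
      by_cases hq : d ≠ PySem.Int.floordiv n d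
      · rw [if_pos hq, if_pos (hcond.mp hq), hfdiv]
        push_cast
        rw [hD]
        ring
      · rw [if_neg hq, if_neg (fun hh => hq (hcond.mpr hh))]
        push_cast
        rw [hD]
        ring
    · rw [if_neg hm, if_neg (fun hh => hm (hdvd_iff.mpr hh))]
      push_cast
      ring
  | case2 t d hc =>
    intro hd hn
    have hsq : n.toNat.sqrt < d.toNat := by
      rw [Nat.sqrt_lt']
      have h0 : ((n.toNat : ℕ) : ℤ) < ((d.toNat ^ 2 : ℕ) : ℤ) := by
        push_cast [Int.toNat_of_nonneg (by omega : (0:ℤ) ≤ d),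
          Int.toNat_of_nonneg (by omega : (0:ℤ) ≤ n)]
        nlinarith
      exact_mod_cast h0
    rw [Finset.Icc_eq_empty (by omega)]
    simp

theorem pairing (N : ℕ) (hN : 1 ≤ N) :
    ∑ j ∈ (Finset.Icc 1 N.sqrt).filter (· ∣ N), (j + if j ≠ N / j then N / j else 0)
      = ∑ j ∈ N.divisors, j := by
  have hset : (Finset.Icc 1 N.sqrt).filter (· ∣ N)
      = N.divisors.filter (fun j => j * j ≤ N) := by
    ext j
    simp only [Finset.mem_filter, Finset.mem_Icc, Nat.mem_divisors, ← Nat.le_sqrt]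
    constructor
    · rintro ⟨⟨h1, h2⟩, h3⟩; exact ⟨⟨h3, by omega⟩, h2⟩
    · rintro ⟨⟨h1, h2⟩, h3⟩
      exact ⟨⟨Nat.pos_of_dvd_of_pos h1 hN, h3⟩, h1⟩
  rw [hset]
  have hcongr : ∑ j ∈ N.divisors.filter (fun j => j * j ≤ N), (j + if j ≠ N / j then N / j else 0)
      = ∑ j ∈ N.divisors.filter (fun j => j * j ≤ N), (j + if j * j ≠ N then N / j else 0) := by
    apply Finset.sum_congr rfl
    intro j hj
    obtain ⟨hjd, _⟩ := Finset.mem_filter.mp hj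
    obtain ⟨hdvd, hN0⟩ := Nat.mem_divisors.mp hjd
    have hj0 : 0 < j := Nat.pos_of_dvd_of_pos hdvd (by omega)
    have hmul : j * (N / j) = N := Nat.mul_div_cancel' hdvd
    congr 1
    by_cases h : j = N / j
    · have hjj : j * j = N := by nth_rewrite 2 [h]; exact hmul
      rw [if_neg (not_not_intro h), if_neg (not_not_intro hjj)]
    · have hne : j * j ≠ N := fun he => h (by rw [← he, Nat.mul_div_cancel _ hj0])
      rw [if_pos h, if_pos hne]
  rw [hcongr, Finset.sum_add_distrib]
  have hswap : ∑ j ∈ N.divisors.filter (fun j => j * j ≤ N), (if j * j ≠ N then N / j else 0)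
      = ∑ j ∈ N.divisors.filter (fun j => j * j < N), N / j := by
    rw [Finset.sum_filter, Finset.sum_filter]
    apply Finset.sum_congr rfl
    intro j hj
    split_ifs <;> first | rfl | omega
  have hbij : ∑ j ∈ N.divisors.filter (fun j => j * j < N), N / j
      = ∑ j ∈ N.divisors.filter (fun j => ¬ j * j ≤ N), j := by
    apply Finset.sum_nbij' (i := fun j => N / j) (j := fun j => N / j)
    · intro a ha
      obtain ⟨had, halt⟩ := Finset.mem_filter.mp ha
      obtain ⟨hdvd, hN0⟩ := Nat.mem_divisors.mp had
      have ha0 : 0 < a := Nat.pos_of_dvd_of_pos hdvd (by omega)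
      have hmul : (N / a) * a = N := Nat.div_mul_cancel hdvd
      have hc0 : 0 < N / a := by
        rcases Nat.eq_zero_or_pos (N / a) with h | h
        · rw [h] at hmul; omega
        · exact h
      refine Finset.mem_filter.mpr ⟨Nat.mem_divisors.mpr ⟨⟨a, hmul.symm ▸ by ring_nf⟩, hN0⟩, ?_⟩
      have haN : a < N / a := by nlinarith
      intro hle
      nlinarith
    · intro a ha
      obtain ⟨had, halt⟩ := Finset.mem_filter.mp ha
      obtain ⟨hdvd, hN0⟩ := Nat.mem_divisors.mp had
      have ha0 : 0 < a := Nat.pos_of_dvd_of_pos hdvd (by omega)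
      have hmul : (N / a) * a = N := Nat.div_mul_cancel hdvd
      have hc0 : 0 < N / a := by
        rcases Nat.eq_zero_or_pos (N / a) with h | h
        · rw [h] at hmul; omega
        · exact h
      refine Finset.mem_filter.mpr ⟨Nat.mem_divisors.mpr ⟨⟨a, hmul.symm ▸ by ring_nf⟩, hN0⟩, ?_⟩
      have hlt : ¬ a * a ≤ N := halt
      have haN : N / a < a := by nlinarith
      nlinarith
    · intro a ha
      obtain ⟨had, _⟩ := Finset.mem_filter.mp ha
      obtain ⟨hdvd, hN0⟩ := Nat.mem_divisors.mp had
      exact Nat.div_div_self hdvd hN0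
    · intro a ha
      obtain ⟨had, _⟩ := Finset.mem_filter.mp ha
      obtain ⟨hdvd, hN0⟩ := Nat.mem_divisors.mp had
      exact Nat.div_div_self hdvd hN0
    · intro a ha
      rfl
  rw [hswap, hbij, ← Finset.sum_filter_add_sum_filter_not N.divisors (fun j => j * j ≤ N)]

theorem dsA_eq_dsum (n : Int) (hn : 1 ≤ n) : dsA n = dsum n := by
  unfold dsA
  rw [dsLoop_spec n 0 1 (by omega) hn]
  rw [show (1 : ℤ).toNat = 1 from rfl, pairing n.toNat (by omega)]
  rw [dsum]
  push_cast
  ring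

def bodyA (result : List Int) (n : Int) : List Int :=
  let pfs := pfsA n
  if pfs = 0 then result
  else
    let ds := dsA n
    if PySem.Int.mod ds pfs = 0 then result ++ [n] else result

def bodyB (out : List Int) (n : Int) : List Int :=
  let r := factorLoop n 0 1 2
  if PySem.Int.mod r.2 r.1 = 0 then out ++ [n] else out

theorem body_eq (acc : List Int) (n : Int) (hn : 2 ≤ n) : bodyA acc n = bodyB acc n := by
  have hpfs : pfsA n = (factorLoop n 0 1 2).1 := by
    unfold pfsA
    rw [pfs_parallel n 2 0 0 1]
    ring
  have hds : dsA n = (factorLoop n 0 1 2).2 := by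
    rw [dsA_eq_dsum n (by omega),
      factorLoop_snd n 0 1 2 (by omega) (by omega) (fun e he hlt _ => by omega)]
    ring
  have hpos' : 2 ≤ (factorLoop n 0 1 2).1 := by
    have h0 := pfsLoop_pos 0 n 2 (by omega) hn
    rw [pfs_parallel n 2 0 0 1] at h0
    omega
  simp only [bodyA, bodyB]
  rw [hpfs, hds, if_neg (by omega)]

theorem pfsA_of_le_one (n : Int) (hn : n ≤ 1) : pfsA n = 0 := by
  unfold pfsA pfsLoop
  rw [dif_neg (by omega), if_neg (by omega)]

theorem foldl_skip (l : List Int) (acc : List Int) (h : ∀ x ∈ l, x < 2) :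
    l.foldl bodyA acc = acc := by
  induction l generalizing acc with
  | nil => rfl
  | cons x xs ih =>
    have hx : x < 2 := h x (by simp)
    have hb : bodyA acc x = acc := by
      simp [bodyA, pfsA_of_le_one x (by omega)]
    rw [List.foldl_cons, hb]
    exact ih acc (fun y hy => h y (by simp [hy]))

theorem main_eq (nMin nMax : Int) : ds_multof_pfs nMin nMax = ds_multof_pfs_alt nMin nMax := by
  show (PySem.List.pyRange nMin (nMax + 1) 1).foldl bodyA []
      = (PySem.List.pyRange (max nMin 2) (nMax + 1) 1).foldl bodyB []
  rcases le_or_gt (max nMin 2) (nMax + 1) with hle | hlt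
  · rw [PySem.List.pyRange_one_append nMin (max nMin 2) (nMax + 1) (le_max_left _ _) hle,
      List.foldl_append]
    rw [foldl_skip _ [] (fun x hx => by
      rw [PySem.List.mem_pyRange_one] at hx
      omega)]
    apply PySem.List.foldl_congr_mem
    intro acc x hx
    rw [PySem.List.mem_pyRange_one] at hx
    exact body_eq acc x (by omega)
  · rw [PySem.List.pyRange_one_eq_nil (by omega : nMax + 1 ≤ max nMin 2)]
    rw [foldl_skip _ [] (fun x hx => by
      rw [PySem.List.mem_pyRange_one] at hx
      omega)]
    rfl

-- ===== VERDICT (by name: the statement is the Claim_ definition above) =====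
theorem ds_multof_pfs_spec : Claim_equal_ds_multof_pfs := by
  intro nMin nMax _
  unfold Spec_ds_multof_pfs
  exact main_eq nMin nMax
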